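-- pv_equiv track=rewrite | github.com/lhcdhr/Braille-translator | to_unicode.py | raisedpos_to_binary
-- ===== SOURCE A (Python) =====
-- def raisedpos_to_binary(s):
--     ''' (str) -> str
--     Convert a string representing a braille character in raised-position
--     representation  into the binary representation.
--     TODO: For students to complete.
--
--     >>> raisedpos_to_binary('')
--     '00000000'
--     >>> raisedpos_to_binary('142536')
--     '11111100'
--     >>> raisedpos_to_binary('14253678')
--     '11111111'
--     >>> raisedpos_to_binary('123')
--     '11100000'
--     >>> raisedpos_to_binary('125')
--     '11001000'
--     '''
--     binary = ''
--     for i in range(1,9):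
--         if str(i) in s:
--             binary = binary+'1'
--         else:
--             binary = binary+'0'
--
--     return binary
-- ===== SOURCE B (Python) =====
-- def raisedpos_to_binary(s):
--     bits = ['0'] * 8
--     for c in s:
--         if '1' <= c <= '8':
--             bits[int(c) - 1] = '1'
--     return ''.join(bits)
-- ===== Notes on version B (the rewrite author's own statement) =====
-- stated objective: alternative
-- what changed: A makes 8 passes, one per digit position, each testing substring containment in s; B makes a single pass over s, scattering each digit character into a position-indexed 8-slot bit array and joining it.
import Mathlib
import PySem

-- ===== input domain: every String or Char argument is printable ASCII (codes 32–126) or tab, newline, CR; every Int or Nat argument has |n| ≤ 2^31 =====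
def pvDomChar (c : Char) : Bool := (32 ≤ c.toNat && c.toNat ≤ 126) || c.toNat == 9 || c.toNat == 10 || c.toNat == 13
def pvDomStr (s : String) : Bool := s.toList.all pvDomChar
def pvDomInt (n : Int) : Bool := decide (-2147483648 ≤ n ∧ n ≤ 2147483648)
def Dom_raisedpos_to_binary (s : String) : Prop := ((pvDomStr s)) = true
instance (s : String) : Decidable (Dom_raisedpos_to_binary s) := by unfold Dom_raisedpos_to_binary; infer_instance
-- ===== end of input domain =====

-- B replaces A's 8-pass "is digit i a substring?" loop by a single scatter pass over the
-- input into a position-indexed bit array (objective: alternative decomposition).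

-- ===== PORT A =====
-- for i in range(1, 9): binary += '1' if str(i) in s else '0'
def raisedpos_to_binary (s : String) : String :=
  (PySem.List.pyRange 1 9 1).foldl
    (fun binary i =>
      if PySem.Str.isIn (PySem.Int.toStr i) s then binary ++ "1" else binary ++ "0") ""

-- ===== PORT B =====
-- bits = ['0']*8; for c in s: if '1' <= c <= '8': bits[int(c)-1] = '1'; return ''.join(bits)
def raisedpos_to_binary_alt (s : String) : String :=
  String.ofList
    (s.toList.foldl
      (fun bits c => if '1' ≤ c ∧ c ≤ '8' then bits.set (c.toNat - 49) '1' else bits)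
      (List.replicate 8 '0'))

-- ===== PRECONDITION & SPEC =====
def Spec_raisedpos_to_binary (s : String) (out : String) : Prop := out = raisedpos_to_binary_alt s
instance (s : String) (out : String) : Decidable (Spec_raisedpos_to_binary s out) := by unfold Spec_raisedpos_to_binary; infer_instance

-- ===== CLAIM (what is proved, stated in full; the proofs are below) =====
def Claim_equal_raisedpos_to_binary : Prop := ∀ (s : String), Dom_raisedpos_to_binary s → Spec_raisedpos_to_binary s (raisedpos_to_binary s)

-- ===== LEMMAS AND PROOFS =====

-- B's guard read on character codes
theorem pv_guard_iff (c : Char) : ('1' ≤ c ∧ c ≤ '8') ↔ (49 ≤ c.toNat ∧ c.toNat ≤ 56) := by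
  simp only [Char.le_def, UInt32.le_iff_toNat_le]; exact Iff.rfl

theorem pv_char_eq_of_toNat (c d : Char) (h : c.toNat = d.toNat) : c = d := by
  apply Char.ext; exact UInt32.toNat_inj.mp h

-- the scatter loop preserves the length of the bit list
theorem pv_scatter_length (l bits : List Char) :
    (l.foldl (fun bits c => if '1' ≤ c ∧ c ≤ '8' then bits.set (c.toNat - 49) '1' else bits)
      bits).length = bits.length := by
  induction l generalizing bits with
  | nil => rfl
  | cons c l ih => simp only [List.foldl_cons]; split_ifs <;> simp [ih]

-- position j of the scatter result: '1' iff the digit char with code 49+j occurs in l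
theorem pv_scatter_get (l : List Char) (d : Char) (hd : 49 ≤ d.toNat ∧ d.toNat ≤ 56)
    (bits : List Char) (hb : bits.length = 8) :
    (l.foldl (fun bits c => if '1' ≤ c ∧ c ≤ '8' then bits.set (c.toNat - 49) '1' else bits)
      bits).getD (d.toNat - 49) ' ' =
    (if d ∈ l then '1' else bits.getD (d.toNat - 49) ' ') := by
  induction l generalizing bits with
  | nil => simp
  | cons c l ih =>
    simp only [List.foldl_cons, List.mem_cons]
    by_cases hg : ('1' ≤ c ∧ c ≤ '8')
    · rw [if_pos hg, ih _ (by simp [hb])]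
      by_cases hm : d ∈ l
      · simp [hm]
      · by_cases hcd : c = d
        · subst hcd
          have hc := (pv_guard_iff c).mp hg
          have hlt : c.toNat - 49 < 8 := by omega
          simp [hm, List.getD_eq_getElem?_getD, hb, hlt]
        · have hne : c.toNat - 49 ≠ d.toNat - 49 := by
            intro h
            have hc := (pv_guard_iff c).mp hg
            exact hcd (pv_char_eq_of_toNat c d (by omega))
          simp [hm, show d ≠ c from fun h => hcd h.symm,
                List.getD_eq_getElem?_getD, hne]
    · rw [if_neg hg]
      rw [ih _ hb]
      have hcd : c ≠ d := fun h => hg ((pv_guard_iff c).mpr (h ▸ hd))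
      simp [show d ≠ c from fun h => hcd h.symm]

-- A's per-digit test "str(i) in s" for a one-character digit string is list membership
theorem pv_isIn_eq (s t : String) (c : Char) (h : t.toList = [c]) :
    PySem.Str.isIn t s = decide (c ∈ s.toList) := by
  rw [Bool.eq_iff_iff, PySem.Str.isIn_iff_infix, h, decide_eq_true_iff]
  exact List.singleton_infix_iff _ _

theorem pv_ite_singleton (p : Prop) [Decidable p] (a b : Char) :
    (if p then [a] else [b]) = [if p then a else b] := by split_ifs <;> rfl

-- ===== VERDICT (by name: the statement is the Claim_ definition above) =====
set_option maxHeartbeats 1000000 in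
theorem raisedpos_to_binary_spec : Claim_equal_raisedpos_to_binary := by
  intro s _
  unfold Spec_raisedpos_to_binary raisedpos_to_binary raisedpos_to_binary_alt
  apply String.toList_inj.mp
  have hlen := pv_scatter_length s.toList (List.replicate 8 '0')
  have hB : ∀ (d : Char) (j : Nat), d.toNat = 49 + j → j < 8 →
      (s.toList.foldl
        (fun bits c => if '1' ≤ c ∧ c ≤ '8' then bits.set (c.toNat - 49) '1' else bits)
        (List.replicate 8 '0')).getD j ' ' =
      (if d ∈ s.toList then '1' else '0') := by
    intro d j hd hj
    rw [show j = d.toNat - 49 from by omega,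
        pv_scatter_get s.toList d ⟨by omega, by omega⟩ (List.replicate 8 '0') (by simp)]
    split_ifs
    · rfl
    · rw [List.getD_eq_getElem?_getD, List.getElem?_replicate]
      simp [show d.toNat - 49 < 8 from by omega]
  have hscat :
      (s.toList.foldl
        (fun bits c => if '1' ≤ c ∧ c ≤ '8' then bits.set (c.toNat - 49) '1' else bits)
        (List.replicate 8 '0')) =
      [if '1' ∈ s.toList then '1' else '0', if '2' ∈ s.toList then '1' else '0',
       if '3' ∈ s.toList then '1' else '0', if '4' ∈ s.toList then '1' else '0',
       if '5' ∈ s.toList then '1' else '0', if '6' ∈ s.toList then '1' else '0',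
       if '7' ∈ s.toList then '1' else '0', if '8' ∈ s.toList then '1' else '0'] := by
    apply List.ext_getElem
    · simp only [hlen, List.length_replicate]; rfl
    · intro j hj hj'
      have hj8 : j < 8 := by simpa only [hlen, List.length_replicate] using hj
      rw [← List.getD_eq_getElem _ ' ' hj]
      interval_cases j
      · rw [hB '1' 0 (by decide) (by decide)]; rfl
      · rw [hB '2' 1 (by decide) (by decide)]; rfl
      · rw [hB '3' 2 (by decide) (by decide)]; rfl
      · rw [hB '4' 3 (by decide) (by decide)]; rfl
      · rw [hB '5' 4 (by decide) (by decide)]; rfl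
      · rw [hB '6' 5 (by decide) (by decide)]; rfl
      · rw [hB '7' 6 (by decide) (by decide)]; rfl
      · rw [hB '8' 7 (by decide) (by decide)]; rfl
  rw [show PySem.List.pyRange 1 9 1 = [1,2,3,4,5,6,7,8] from by decide]
  simp only [List.foldl_cons, List.foldl_nil,
    pv_isIn_eq s (PySem.Int.toStr 1) '1' (by decide),
    pv_isIn_eq s (PySem.Int.toStr 2) '2' (by decide),
    pv_isIn_eq s (PySem.Int.toStr 3) '3' (by decide),
    pv_isIn_eq s (PySem.Int.toStr 4) '4' (by decide),
    pv_isIn_eq s (PySem.Int.toStr 5) '5' (by decide),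
    pv_isIn_eq s (PySem.Int.toStr 6) '6' (by decide),
    pv_isIn_eq s (PySem.Int.toStr 7) '7' (by decide),
    pv_isIn_eq s (PySem.Int.toStr 8) '8' (by decide)]
  rw [String.toList_ofList, hscat]
  simp only [String.toList_append, apply_ite String.toList,
    show String.toList "1" = ['1'] from by decide, show String.toList "0" = ['0'] from by decide,
    show String.toList "" = [] from rfl, decide_eq_true_eq, pv_ite_singleton,
    List.nil_append, List.singleton_append]
  split_ifs <;> rfl
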